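-- pv_equiv track=rewrite | github.com/MechanicalDeus/Mechanicals-Nexus---Inference-Control | src/nexus/output/context_metrics.py | next_open_suggestion_count
-- ===== SOURCE A (Python) =====
-- def next_open_suggestion_count(text: str) -> int:
--     """Zählt Bullet-Zeilen unter der NEXT_OPEN-Sektion (wie in ``_next_open_lines``)."""
--     if "NEXT_OPEN" not in text:
--         return 0
--     lines = text.splitlines()
--     in_section = False
--     count = 0
--     for line in lines:
--         if line.startswith("NEXT_OPEN"):
--             in_section = True
--             continue
--         if in_section:
--             stripped = line.strip()
--             if stripped == "":
--                 break
--             if stripped.startswith("- "):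
--                 count += 1
--     return count
-- ===== SOURCE B (Python) =====
-- def next_open_suggestion_count(text: str) -> int:
--     """Zählt Bullet-Zeilen unter der NEXT_OPEN-Sektion (wie in ``_next_open_lines``)."""
--     if "NEXT_OPEN" not in text:
--         return 0
--     lines = text.splitlines()
--     start = next((i for i, line in enumerate(lines) if line.startswith("NEXT_OPEN")), None)
--     if start is None:
--         return 0
--     rest = lines[start + 1:]
--     stop = next((i for i, line in enumerate(rest) if line.strip() == ""), len(rest))
--     return sum(1 for line in rest[:stop] if line.strip().startswith("- "))
-- ===== Notes on version B (the rewrite author's own statement) =====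
-- stated objective: idiomatic
-- what changed: Replaces the in_section flag / break state machine with locate-then-slice-then-count: find the index of the first NEXT_OPEN header line, find the first blank line after it, and count bullet lines in that slice.
import Mathlib
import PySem

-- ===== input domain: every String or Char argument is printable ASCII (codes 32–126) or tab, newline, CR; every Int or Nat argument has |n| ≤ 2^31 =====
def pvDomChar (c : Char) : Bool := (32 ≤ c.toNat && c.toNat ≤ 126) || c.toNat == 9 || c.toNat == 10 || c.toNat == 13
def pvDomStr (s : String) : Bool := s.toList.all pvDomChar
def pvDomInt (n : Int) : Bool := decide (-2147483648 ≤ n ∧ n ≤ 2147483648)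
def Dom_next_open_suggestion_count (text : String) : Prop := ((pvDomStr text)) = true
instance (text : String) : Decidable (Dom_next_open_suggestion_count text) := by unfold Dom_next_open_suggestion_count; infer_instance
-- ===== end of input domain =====

-- B replaces A's in_section-flag/break state machine with an idiomatic locate-then-slice-then-count decomposition (same cost).

-- ===== PORT A =====
-- the for-loop with `continue`/`break` and the (in_section, count) state, as structural recursion
def pvLoopA : List String → Bool → Int → Int
  | [], _, count => count
  | line :: rest, inSection, count =>
    if PySem.Str.startswith line "NEXT_OPEN" then pvLoopA rest true count
    else if inSection then
      if PySem.Str.strip line = "" then count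
      else if PySem.Str.startswith (PySem.Str.strip line) "- " then pvLoopA rest true (count + 1)
      else pvLoopA rest true count
    else pvLoopA rest false count

def next_open_suggestion_count (text : String) : Int :=
  if PySem.Str.isIn "NEXT_OPEN" text then
    pvLoopA (PySem.Str.splitlines text) false 0
  else 0

-- ===== PORT B =====
def next_open_suggestion_count_alt (text : String) : Int :=
  if PySem.Str.isIn "NEXT_OPEN" text then
    let lines := PySem.Str.splitlines text
    match lines.findIdx? (fun l => PySem.Str.startswith l "NEXT_OPEN") with
    | none => 0
    | some start =>
      let rest := lines.drop (start + 1)      -- lines[start+1:]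
      let stop := ((rest.findIdx? (fun l => PySem.Str.strip l == "")).getD rest.length)
      ((rest.take stop).countP (fun l => PySem.Str.startswith (PySem.Str.strip l) "- ") : Int)
  else 0

-- ===== PRECONDITION & SPEC =====
def Spec_next_open_suggestion_count (text : String) (out : Int) : Prop := out = next_open_suggestion_count_alt text
instance (text : String) (out : Int) : Decidable (Spec_next_open_suggestion_count text out) := by unfold Spec_next_open_suggestion_count; infer_instance

-- ===== CLAIM (what is proved, stated in full; the proofs are below) =====
def Claim_equal_next_open_suggestion_count : Prop := ∀ (text : String), Dom_next_open_suggestion_count text → Spec_next_open_suggestion_count text (next_open_suggestion_count text)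

-- ===== LEMMAS AND PROOFS =====

-- B's count of the section, as a standalone function of the tail after the header.
def pvCnt (rest : List String) : Int :=
  ((rest.take ((rest.findIdx? (fun l => PySem.Str.strip l == "")).getD rest.length)).countP
    (fun l => PySem.Str.startswith (PySem.Str.strip l) "- ") : Int)

lemma pvCnt_nil : pvCnt [] = 0 := by simp [pvCnt]

lemma pvCnt_cons_blank (l : String) (r : List String) (h : PySem.Str.strip l = "") :
    pvCnt (l :: r) = 0 := by
  simp [pvCnt, List.findIdx?_cons, h]

lemma pvCnt_cons_nonblank (l : String) (r : List String) (h : ¬ PySem.Str.strip l = "") :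
    pvCnt (l :: r) = (if PySem.Str.startswith (PySem.Str.strip l) "- " then 1 else 0) + pvCnt r := by
  simp only [pvCnt, List.findIdx?_cons]
  have hb : (PySem.Str.strip l == "") = false := by simpa using h
  rw [hb]
  cases hf : r.findIdx? (fun l => PySem.Str.strip l == "") with
  | none =>
      simp [List.countP_cons]
      split_ifs <;> omega
  | some i =>
      simp [List.take_succ_cons, List.countP_cons]
      split_ifs <;> omega

-- A header line starts with 'N' (non-space), so its strip is nonempty, starts with 'N', and is no bullet.
lemma strip_cons_head (c : Char) (t : List Char) (h : PySem.Chars.isspace c = false) :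
    ∃ u, PySem.Chars.strip (c :: t) = c :: u := by
  simp only [PySem.Chars.strip, PySem.Chars.lstrip, PySem.Chars.rstrip, List.dropWhile_cons, h,
    Bool.false_eq_true, if_false, List.reverse_cons, List.dropWhile_append]
  split
  · exact ⟨[], by simp⟩
  · exact ⟨(List.dropWhile PySem.Chars.isspace t.reverse).reverse, by simp⟩

lemma header_facts (l : String) (h : PySem.Str.startswith l "NEXT_OPEN" = true) :
    ¬ PySem.Str.strip l = "" ∧ PySem.Str.startswith (PySem.Str.strip l) "- " = false := by
  have hp : ("NEXT_OPEN".toList) <+: l.toList := by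
    rw [← PySem.Chars.startswith_iff]; simpa using h
  obtain ⟨t, ht⟩ : ∃ t, l.toList = 'N' :: t := by
    obtain ⟨s, hs⟩ := hp
    exact ⟨"EXT_OPEN".toList ++ s, by simpa using hs.symm⟩
  obtain ⟨u, hu⟩ := strip_cons_head 'N' t (by decide)
  have hstrip : (PySem.Str.strip l).toList = 'N' :: u := by
    rw [PySem.Str.toList_strip, ht, hu]
  constructor
  · intro he
    rw [he] at hstrip
    simp at hstrip
  · have : PySem.Str.startswith (PySem.Str.strip l) "- " =
        PySem.Chars.startswith (PySem.Str.strip l).toList "- ".toList := by simp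
    rw [this, hstrip]
    simp [PySem.Chars.startswith, List.isPrefixOf]

-- section phase: the flagged loop with in_section = True is c + B's slice count
lemma loopA_true (rest : List String) : ∀ c : Int, pvLoopA rest true c = c + pvCnt rest := by
  induction rest with
  | nil => intro c; simp [pvLoopA, pvCnt_nil]
  | cons l r ih =>
    intro c
    by_cases hh : PySem.Str.startswith l "NEXT_OPEN" = true
    · obtain ⟨hnb, hnbul⟩ := header_facts l hh
      rw [pvLoopA, if_pos hh, ih, pvCnt_cons_nonblank l r hnb, hnbul]
      simp
    · by_cases hb : PySem.Str.strip l = ""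
      · rw [pvLoopA, if_neg hh, if_pos rfl, if_pos hb, pvCnt_cons_blank l r hb]
        omega
      · by_cases hbul : PySem.Str.startswith (PySem.Str.strip l) "- " = true
        · rw [pvLoopA, if_neg hh, if_pos rfl, if_neg hb, if_pos hbul, ih,
            pvCnt_cons_nonblank l r hb, if_pos hbul]
          omega
        · rw [pvLoopA, if_neg hh, if_pos rfl, if_neg hb, if_neg hbul, ih,
            pvCnt_cons_nonblank l r hb, if_neg hbul]
          omega

-- scan phase: the loop with in_section = False finds the first header, then runs the section phase
lemma loopA_false (lines : List String) :
    pvLoopA lines false 0 =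
      match lines.findIdx? (fun l => PySem.Str.startswith l "NEXT_OPEN") with
      | none => 0
      | some s => pvCnt (lines.drop (s + 1)) := by
  induction lines with
  | nil => simp [pvLoopA]
  | cons l r ih =>
    by_cases hh : PySem.Str.startswith l "NEXT_OPEN" = true
    · rw [pvLoopA, if_pos hh, loopA_true, List.findIdx?_cons]
      simp only [hh, reduceIte, List.drop_succ_cons, List.drop_zero, zero_add]
    · have hh' : PySem.Str.startswith l "NEXT_OPEN" = false := by
        simpa using hh
      rw [pvLoopA, if_neg hh, if_neg (by simp), ih, List.findIdx?_cons]
      simp only [hh']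
      cases hf : r.findIdx? (fun l => PySem.Str.startswith l "NEXT_OPEN") with
      | none => rfl
      | some i => simp only [Option.map_some, List.drop_succ_cons]; rfl

-- ===== VERDICT (by name: the statement is the Claim_ definition above) =====
theorem next_open_suggestion_count_spec : Claim_equal_next_open_suggestion_count := by
  intro text _
  unfold Spec_next_open_suggestion_count next_open_suggestion_count next_open_suggestion_count_alt
  by_cases hg : PySem.Str.isIn "NEXT_OPEN" text = true
  · rw [if_pos hg, if_pos hg, loopA_false]
    cases hf : (PySem.Str.splitlines text).findIdx? (fun l => PySem.Str.startswith l "NEXT_OPEN") with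
    | none => simp only [hf]
    | some s => simp only [hf, pvCnt]
  · rw [if_neg hg, if_neg hg]
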